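/- GENERATED by mk_final_copies.py from the proof of the farm's unit `compute_codewords.6` (farm:compute_codewords.6.1: Proof.lean) as the
   re-elaboration sweep compiled it — do not edit. -/
import Asan.CheckWalk
import Vorbis.Spec.Units.compute_codewords_6

/- Segment 6 of compute_codewords (0x10835c – 0x108371 + 0x108341, 6 instructions, one check site; lines 1143 – 1144: `z = len[i]`,
   `if (z == NO_CODE) continue;`): from the assertion `AtLen i` at the check of `len[i]` to the head of the main loop with index `i + 1`
   (`len[i] = 255`: the count `m` is unchanged, `usedCount_succ_unused`) or to the head of loop 1143 (`AtScan i`). -/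
open X86 X86.User Asan Vorbis Vorbis.Spec
open Vorbis.Spec.compute_codewords

set_option maxRecDepth 4000
set_option maxHeartbeats 4000000

theorem Vorbis.Spec.Worked.compute_codewords_6_ok : Vorbis.Spec.compute_codewords_6.Statement := by
  intro Lay hLay μ hμ u₀ hcode hload1 others frames Blk u ret i v hat
  -- the entry state's facts, from the assertion
  have he := hat.entry
  v_entry he
  have hpre := hat.pre
  have hsh := hpre.shadow
  have hsp := hsh.rsp
  have hn24 := cw_n_lt hpre
  have hinvB := cw_inv_pushed hsh he_align he_room he_top
  have hLive := cw_blkLive_pushed ((u.reg .rsp).toNat - 248) Vorbis.Frames.compute_codewords hpre.live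
  have hilt := hat.i_lt
  have hw : Vorbis.L.textHi ≤ (u.reg .rsi).toNat ∧ (u.reg .rsi).toNat + (u.reg .rdx).toNat % 2 ^ 32 ≤ 0xC00000 ∧
      ((u.reg .rsp).toNat + 8 ≤ (u.reg .rsi).toNat ∨ (u.reg .rsi).toNat + (u.reg .rdx).toNat % 2 ^ 32 ≤ 0x700000 ∨
        0x800000 ≤ (u.reg .rsi).toNat) :=
    blk_where hpre.live hsh.inv hsh.offText (by omega) hpre.lens (by show 1 ≤ (u.reg .rdx).toNat % 2 ^ 32; omega)
  have hval := hat.val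
  have hslot := hat.slot
  have w_rip := hat.rip
  have w_r13 := hat.r13
  have w_r12 := hat.r12
  have w_rbp := hat.rbp
  have w_rdi := hat.rdi
  have hbK := hat.body
  obtain ⟨w_rsp, w_eq, hdf, hmx, hsame, hbody, hs0, hs1, hs2, hs3, hs4, hs5, hs6, hsLen, hsC, hsVal, hsN⟩ := hat.body
  have w_sse : SseOK v := ⟨hmx⟩
  have w_kept := cw_kept_all u v
  unfold cw_allRegs at w_kept
  have haddr := cw_idx_addr i (u.reg .rsi) (by omega) (by omega)
  -- the byte `len[i]` reads as at the entry (`cwWindows u` miss `len[0 .. n)`)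
  have hbyte : v.mem.readLE (Word.ofBV (BitVec.signExtend 64 (BitVec.ofNat 32 i)) + u.reg .rsi) 1 =
      u.mem.u8 ((u.reg .rsi).toNat + i) :=
    cw_len_kept hpre he_room he_top hsame hilt _ haddr
  have hblt := Mem.u8_lt u.mem ((u.reg .rsi).toNat + i)
  have hz : (BitVec.zeroExtend 32 (BitVec.ofNat 8 (u.mem.u8 ((u.reg .rsi).toNat + i)))).toNat =
      u.mem.u8 ((u.reg .rsi).toNat + i) := by
    simp only [BitVec.zeroExtend, BitVec.toNat_setWidth, BitVec.toNat_ofNat]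
    omega
  have hzeq : BitVec.zeroExtend 32 (BitVec.ofNat 8 (u.mem.u8 ((u.reg .rsi).toNat + i))) =
      BitVec.ofNat 32 (u.mem.u8 ((u.reg .rsi).toNat + i)) := by
    apply BitVec.eq_of_toNat_eq
    rw [hz, BitVec.toNat_ofNat]
    omega
  u_walk hcode [hμ.vendor] until [Vorbis.L.compute_codewords.cut8, Vorbis.L.compute_codewords.cut5] span [Vorbis.L.textLo, Vorbis.L.textHi] side (v_side)
  · -- check_10835c: `len[i]`, `i < n`, lies in the block `len`; the body has the shadow the prologue left
    have hun : ShadowUntouched (cw_poisonedMem u) s_10835c.mem := by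
      rw [w_mem]
      exact Mem.EqOn.trans hbody (Mem.EqOn.writeLE _ _ _ _ _ _ (by u_omega) (by u_omega))
    refine check_site (a := (u.reg .rsi).toNat + i) hinvB hun (Site.of_blk hLive hpre.lens ?_ ?_ (Nat.le_refl 1)) haddr
    · show (u.reg .rsi).toNat ≤ (u.reg .rsi).toNat + i
      omega
    · show (u.reg .rsi).toNat + i + 1 ≤ (u.reg .rsi).toNat + (u.reg .rdx).toNat % 2 ^ 32
      omega
  · -- `len[i] ≠ 255`: on to the head of loop 1143 (`AtScan i`)
    rw [hz] at hbr_10836b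
    have hE : Mem.EqOn ((u.reg .rsp).toNat - 296) ((u.reg .rsp).toNat + 8) v.mem s_10836b.mem := by
      rw [w_mem]
      exact Mem.EqOn.writeLE _ _ _ _ _ _ (by u_omega) (by u_omega)
    have hsx : Mem.SameExcept [⟨(u.reg .rsp).toNat - 304, (u.reg .rsp).toNat - 296⟩] v.mem s_10836b.mem := by
      rw [w_mem]
      exact Mem.SameExcept.writeLE _ _ _ _ _ (by u_omega) ⟨_, List.mem_singleton.mpr rfl, by u_omega, by u_omega⟩
    have hi : X86.User.abiInv s_10836b := by
      v_inv
    have hslot' : UInt64.ofNat (s_10836b.mem.readLE (u.reg .rsp - 256) 8) = (u.reg .rsp - 248) >>> 3 := by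
      u_frame hslot
    refine ReachVia.done (Or.inr ?_)
    refine { entry := hat.entry, pre := hpre, body := hbK.carry hE he_room he_top w_rsp w_eq hi.1 hi.2 ?_ ?_,
             rip := w_rip, i_lt := hilt, used := hbr_10836b, r13 := w_r13, r12 := w_r12, rbp := w_rbp, rbx := ?_,
             slot := hslot', val := ?_ }
    · u_same
    · rw [w_mem]
      exact Mem.EqOn.trans hbody (Mem.EqOn.writeLE _ _ _ _ _ _ (by u_omega) (by u_omega))
    · rw [w_rbx, hzeq]
    · intro hs
      refine cw_val_carry hpre he_room he_top hs (cw_used_le hpre hs (Nat.le_of_lt hilt)) (hval hs) hsx ?_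
      intro w hwm
      have e := List.mem_singleton.mp hwm
      subst e
      left
      show 7340032 ≤ (u.reg .rsp).toNat - 304 ∧ (u.reg .rsp).toNat - 296 ≤ (u.reg .rsp).toNat + 8
      omega
  · -- `len[i] = 255`: `continue`: `++i`, the count `m` is unchanged
    rw [hz] at hbr_10836b
    have hE : Mem.EqOn ((u.reg .rsp).toNat - 296) ((u.reg .rsp).toNat + 8) v.mem s_108341.mem := by
      rw [w_mem]
      exact Mem.EqOn.writeLE _ _ _ _ _ _ (by u_omega) (by u_omega)
    have hsx : Mem.SameExcept [⟨(u.reg .rsp).toNat - 304, (u.reg .rsp).toNat - 296⟩] v.mem s_108341.mem := by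
      rw [w_mem]
      exact Mem.SameExcept.writeLE _ _ _ _ _ (by u_omega) ⟨_, List.mem_singleton.mpr rfl, by u_omega, by u_omega⟩
    have hi : X86.User.abiInv s_108341 := by
      v_inv
    have hslot' : UInt64.ofNat (s_108341.mem.readLE (u.reg .rsp - 256) 8) = (u.reg .rsp - 248) >>> 3 := by
      u_frame hslot
    have hcount : usedCount u.mem (u.reg .rsi).toNat (i + 1) = usedCount u.mem (u.reg .rsi).toNat i :=
      usedCount_succ_unused hbr_10836b
    refine ReachVia.done (Or.inl ?_)
    refine { entry := hat.entry, pre := hpre, body := hbK.carry hE he_room he_top w_rsp w_eq hi.1 hi.2 ?_ ?_,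
             rip := w_rip, r13 := ?_, r12 := ?_, slot := hslot', i_le := hilt, val := ?_ }
    · u_same
    · rw [w_mem]
      exact Mem.EqOn.trans hbody (Mem.EqOn.writeLE _ _ _ _ _ _ (by u_omega) (by u_omega))
    · rw [w_r13]
      exact cw_inc_lit32 i
    · rw [hcount]
      exact w_r12
    · intro hs
      rw [hcount]
      refine cw_val_carry hpre he_room he_top hs (cw_used_le hpre hs (Nat.le_of_lt hilt)) (hval hs) hsx ?_
      intro w hwm
      have e := List.mem_singleton.mp hwm
      subst e
      left
      show 7340032 ≤ (u.reg .rsp).toNat - 304 ∧ (u.reg .rsp).toNat - 296 ≤ (u.reg .rsp).toNat + 8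
      omega
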